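-- pv_equiv track=rewrite | github.com/homelanmder/supershellUpgrade | flask/module/client.py | get_filter_dict
-- ===== SOURCE A (Python) =====
-- def get_filter_dict(source_list):
--     '''
--         获取全部数据特定项的全部取值，作为筛选的条件项
--     '''
--     # filter_dict = {
--     #     'attribution': [],
--     #     'os': [],
--     #     'arch': [],
--     #     'version': [],
--     #     'group': [],
--     #     'status': []
--     # }
--     # for s in source_list:
--     #     for k in filter_dict.keys():
--     #         if s[k] not in filter_dict[k]:
--     #             filter_dict[k].append(s[k])
--     # return filter_dict
--     filter_dict = {
--         'attribution': [],
--         'os': [],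
--         'arch': [],
--         'version': [],
--         'group': [],
--         'status': []
--     }
--
--     for s in source_list:
--         for k in filter_dict:
--             val = s.get(k)
--             if val is not None and val not in filter_dict[k]:
--                 filter_dict[k].append(val)
--
--     return filter_dict
-- ===== SOURCE B (Python) =====
-- def get_filter_dict(source_list):
--     keys = ('attribution', 'os', 'arch', 'version', 'group', 'status')
--     res = {}
--     for k in keys:
--         col = [s.get(k) for s in source_list]
--         out = []
--         while col:
--             h = col[0]
--             if h is not None:
--                 out.append(h)
--             col = [x for x in col[1:] if x != h]
--         res[k] = out
--     return res
-- ===== Notes on version B (the rewrite author's own statement) =====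
-- stated objective: alternative
-- what changed: Replaces A's row-major pass with per-key membership tests by a per-key worklist loop that, after emitting the head of the remaining column, filters all later equal values (and Nones) out of the worklist, so no seen-structure or membership test exists at all.
import Mathlib
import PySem

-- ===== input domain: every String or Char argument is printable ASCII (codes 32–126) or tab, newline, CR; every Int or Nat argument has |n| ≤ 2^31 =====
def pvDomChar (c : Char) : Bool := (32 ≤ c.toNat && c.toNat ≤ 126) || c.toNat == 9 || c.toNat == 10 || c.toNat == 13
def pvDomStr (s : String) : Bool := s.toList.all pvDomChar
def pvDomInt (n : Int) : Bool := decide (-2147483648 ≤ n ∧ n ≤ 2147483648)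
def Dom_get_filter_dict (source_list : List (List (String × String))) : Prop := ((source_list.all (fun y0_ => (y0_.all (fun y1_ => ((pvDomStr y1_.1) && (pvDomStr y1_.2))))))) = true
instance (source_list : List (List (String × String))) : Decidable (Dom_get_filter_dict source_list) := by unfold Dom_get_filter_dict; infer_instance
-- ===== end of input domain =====

-- B replaces A's row-major pass with 'not in' membership tests by per-key worklist loops
-- that emit the head of the remaining column and filter all later equal values out; same values, same order.

-- ===== PORT A =====
-- one step of A's inner loop body: for key k, read s.get(k); append if non-None and not already collected
def pvStepA (s : List (String × String)) (d : PySem.Dict String (List String)) (k : String) : PySem.Dict String (List String) :=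
  match (PySem.Dict.mk s).get? k with
  | some v => if v ∈ d.getD k [] then d else d.insert k (d.getD k [] ++ [v])
  | none => d

def get_filter_dict (source_list : List (List (String × String))) : List (String × List String) :=
  let init : PySem.Dict String (List String) :=
    (((((PySem.Dict.empty.insert "attribution" []).insert "os" []).insert "arch" []).insert "version" []).insert "group" []).insert "status" []
  let final := source_list.foldl (fun d s => d.keys.foldl (pvStepA s) d) init
  final.items

-- ===== PORT B =====
-- B's while-loop over the remaining column: emit the head (if not None), drop all later equal values
def pvUniq : List (Option String) → List String
  | [] => []
  | h :: t =>
    match h with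
    | some v => v :: pvUniq (t.filter (fun x => x ≠ some v))
    | none => pvUniq (t.filter (fun x => x ≠ none))
termination_by l => l.length
decreasing_by
  all_goals
    simp only [List.length_unattach]
    exact Nat.lt_succ_of_le (le_trans (List.length_filter_le _ _) (by simp))

def get_filter_dict_alt (source_list : List (List (String × String))) : List (String × List String) :=
  ["attribution", "os", "arch", "version", "group", "status"].map (fun k =>
    (k, pvUniq (source_list.map (fun s => (PySem.Dict.mk s).get? k))))

-- ===== PRECONDITION & SPEC =====
def Spec_get_filter_dict (source_list : List (List (String × String))) (out : List (String × List String)) : Prop := out = get_filter_dict_alt source_list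
instance (source_list : List (List (String × String))) (out : List (String × List String)) : Decidable (Spec_get_filter_dict source_list out) := by unfold Spec_get_filter_dict; infer_instance

-- ===== CLAIM (what is proved, stated in full; the proofs are below) =====
def Claim_equal_get_filter_dict : Prop := ∀ (source_list : List (List (String × String))), Dom_get_filter_dict source_list → Spec_get_filter_dict source_list (get_filter_dict source_list)

-- ===== LEMMAS AND PROOFS =====

-- the generic 6-entry state of A's dict
def pvMk6 (a o r v g st : List String) : PySem.Dict String (List String) :=
  PySem.Dict.mk [("attribution", a), ("os", o), ("arch", r), ("version", v), ("group", g), ("status", st)]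

-- the column step: what pvStepA does to the single affected entry
def pvCol (k : String) (l : List String) (s : List (String × String)) : List String :=
  match (PySem.Dict.mk s).get? k with
  | some v => if v ∈ l then l else l ++ [v]
  | none => l

lemma pvStep1 (s : List (String × String)) (a o r v g st : List String) :
    pvStepA s (pvMk6 a o r v g st) "attribution" = pvMk6 (pvCol "attribution" a s) o r v g st := by
  simp only [pvStepA, pvCol, pvMk6]
  cases h : (PySem.Dict.mk s).get? "attribution" with
  | none => rfl
  | some x =>
    simp only [PySem.Dict.getD, PySem.Dict.get?, PySem.Dict.insert, PySem.Dict.contains,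
      List.find?, List.map, List.any]
    simp
    split_ifs <;> rfl

lemma pvStep2 (s : List (String × String)) (a o r v g st : List String) :
    pvStepA s (pvMk6 a o r v g st) "os" = pvMk6 a (pvCol "os" o s) r v g st := by
  simp only [pvStepA, pvCol, pvMk6]
  cases h : (PySem.Dict.mk s).get? "os" with
  | none => rfl
  | some x =>
    simp only [PySem.Dict.getD, PySem.Dict.get?, PySem.Dict.insert, PySem.Dict.contains,
      List.find?, List.map, List.any]
    simp
    split_ifs <;> rfl

lemma pvStep3 (s : List (String × String)) (a o r v g st : List String) :
    pvStepA s (pvMk6 a o r v g st) "arch" = pvMk6 a o (pvCol "arch" r s) v g st := by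
  simp only [pvStepA, pvCol, pvMk6]
  cases h : (PySem.Dict.mk s).get? "arch" with
  | none => rfl
  | some x =>
    simp only [PySem.Dict.getD, PySem.Dict.get?, PySem.Dict.insert, PySem.Dict.contains,
      List.find?, List.map, List.any]
    simp
    split_ifs <;> rfl

lemma pvStep4 (s : List (String × String)) (a o r v g st : List String) :
    pvStepA s (pvMk6 a o r v g st) "version" = pvMk6 a o r (pvCol "version" v s) g st := by
  simp only [pvStepA, pvCol, pvMk6]
  cases h : (PySem.Dict.mk s).get? "version" with
  | none => rfl
  | some x =>
    simp only [PySem.Dict.getD, PySem.Dict.get?, PySem.Dict.insert, PySem.Dict.contains,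
      List.find?, List.map, List.any]
    simp
    split_ifs <;> rfl

lemma pvStep5 (s : List (String × String)) (a o r v g st : List String) :
    pvStepA s (pvMk6 a o r v g st) "group" = pvMk6 a o r v (pvCol "group" g s) st := by
  simp only [pvStepA, pvCol, pvMk6]
  cases h : (PySem.Dict.mk s).get? "group" with
  | none => rfl
  | some x =>
    simp only [PySem.Dict.getD, PySem.Dict.get?, PySem.Dict.insert, PySem.Dict.contains,
      List.find?, List.map, List.any]
    simp
    split_ifs <;> rfl

lemma pvStep6 (s : List (String × String)) (a o r v g st : List String) :
    pvStepA s (pvMk6 a o r v g st) "status" = pvMk6 a o r v g (pvCol "status" st s) := by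
  simp only [pvStepA, pvCol, pvMk6]
  cases h : (PySem.Dict.mk s).get? "status" with
  | none => rfl
  | some x =>
    simp only [PySem.Dict.getD, PySem.Dict.get?, PySem.Dict.insert, PySem.Dict.contains,
      List.find?, List.map, List.any]
    simp
    split_ifs <;> rfl

lemma pvInner (s : List (String × String)) (a o r v g st : List String) :
    (pvMk6 a o r v g st).keys.foldl (pvStepA s) (pvMk6 a o r v g st) =
    pvMk6 (pvCol "attribution" a s) (pvCol "os" o s) (pvCol "arch" r s)
          (pvCol "version" v s) (pvCol "group" g s) (pvCol "status" st s) := by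
  have hk : (pvMk6 a o r v g st).keys = ["attribution", "os", "arch", "version", "group", "status"] := rfl
  rw [hk]
  simp only [List.foldl]
  rw [pvStep1, pvStep2, pvStep3, pvStep4, pvStep5, pvStep6]

lemma pvOuter (rows : List (List (String × String))) (a o r v g st : List String) :
    rows.foldl (fun d s => d.keys.foldl (pvStepA s) d) (pvMk6 a o r v g st) =
    pvMk6 (rows.foldl (pvCol "attribution") a) (rows.foldl (pvCol "os") o)
          (rows.foldl (pvCol "arch") r) (rows.foldl (pvCol "version") v)
          (rows.foldl (pvCol "group") g) (rows.foldl (pvCol "status") st) := by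
  induction rows generalizing a o r v g st with
  | nil => rfl
  | cons s rest ih =>
    simp only [List.foldl]
    rw [pvInner, ih]

-- A's column fold over rows equals a fold of Set.add over the column of looked-up values
lemma pvColFold (k : String) (rows : List (List (String × String))) (l : List String) :
    rows.foldl (pvCol k) l = ((rows.map (fun s => (PySem.Dict.mk s).get? k)).filterMap id).foldl PySem.Set.add l := by
  induction rows generalizing l with
  | nil => rfl
  | cons s rest ih =>
    simp only [List.foldl, List.map, List.filterMap]
    cases h : (PySem.Dict.mk s).get? k <;>
      simp [h, pvCol, PySem.Set.add, PySem.Set.contains, ih]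

-- skipping values already in the accumulator leaves a Set.add fold unchanged
lemma pvFoldSkip (v : String) (xs : List String) (acc : List String) (hv : v ∈ acc) :
    xs.foldl PySem.Set.add acc = (xs.filter (fun x => x ≠ v)).foldl PySem.Set.add acc := by
  induction xs generalizing acc with
  | nil => rfl
  | cons x t ih =>
    by_cases hx : x = v
    · subst hx
      have : PySem.Set.add acc x = acc := by
        simp [PySem.Set.add, PySem.Set.contains, hv]
      simp [List.filter, List.foldl, this, ih acc hv]
    · have hmem : v ∈ PySem.Set.add acc x := by
        simp [PySem.Set.add, PySem.Set.contains]
        split_ifs <;> simp [hv]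
      simp [List.filter, List.foldl, hx, ih _ hmem]

-- an accumulator head not occurring in xs passes through a Set.add fold
lemma pvFoldHead (v : String) (xs : List String) (l : List String) (h : ∀ x ∈ xs, x ≠ v) :
    xs.foldl PySem.Set.add (v :: l) = v :: xs.foldl PySem.Set.add l := by
  induction xs generalizing l with
  | nil => rfl
  | cons x t ih =>
    have hx : x ≠ v := h x (List.mem_cons_self)
    have hadd : PySem.Set.add (v :: l) x = v :: PySem.Set.add l x := by
      simp [PySem.Set.add, PySem.Set.contains, hx]
      split_ifs <;> simp
    simp only [List.foldl, hadd]
    exact ih _ (fun y hy => h y (List.mem_cons_of_mem _ hy))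

-- filtering the option column then extracting = extracting then filtering the values
lemma pvFilterMapFilter (v : String) (t : List (Option String)) :
    (t.filter (fun x => x ≠ some v)).filterMap id = (t.filterMap id).filter (fun x => x ≠ v) := by
  induction t with
  | nil => rfl
  | cons x r ih =>
    cases x with
    | none => simpa using ih
    | some w =>
      by_cases hw : w = v
      · subst hw; simpa using ih
      · simpa [hw] using ih

lemma pvFilterNone (t : List (Option String)) :
    (t.filter (fun x => x ≠ (none : Option String))).filterMap id = t.filterMap id := by
  induction t with
  | nil => rfl
  | cons x r ih => cases x <;> simpa using ih

-- B's worklist dedup equals the seen-set fold of A over the extracted values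
lemma pvUniqEqAux (n : Nat) : ∀ (ys : List (Option String)), ys.length ≤ n →
    pvUniq ys = (ys.filterMap id).foldl PySem.Set.add [] := by
  induction n with
  | zero =>
    intro ys h
    have : ys = [] := List.eq_nil_of_length_eq_zero (Nat.le_zero.mp h)
    subst this; rw [pvUniq]; rfl
  | succ n ih =>
    intro ys h
    match ys with
    | [] => rw [pvUniq]; rfl
    | some v :: t =>
      have hlen : (t.filter (fun x => x ≠ some v)).length ≤ n :=
        le_trans (List.length_filter_le _ _) (Nat.le_of_succ_le_succ h)
      rw [pvUniq, ih _ hlen, pvFilterMapFilter]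
      have hrhs : ((some v :: t).filterMap id) = v :: t.filterMap id := by simp
      rw [hrhs, List.foldl_cons]
      have hadd : PySem.Set.add ([] : List String) v = [v] := rfl
      rw [hadd, pvFoldSkip v _ [v] (by simp),
          pvFoldHead v _ [] (fun x hx => by simpa using List.of_mem_filter hx)]
    | none :: t =>
      have hlen : (t.filter (fun x => x ≠ (none : Option String))).length ≤ n :=
        le_trans (List.length_filter_le _ _) (Nat.le_of_succ_le_succ h)
      rw [pvUniq, ih _ hlen, pvFilterNone]
      simp

lemma pvUniqEq (ys : List (Option String)) :
    pvUniq ys = (ys.filterMap id).foldl PySem.Set.add [] :=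
  pvUniqEqAux ys.length ys le_rfl

lemma pvColUniq (k : String) (rows : List (List (String × String))) :
    rows.foldl (pvCol k) [] = pvUniq (rows.map (fun s => (PySem.Dict.mk s).get? k)) := by
  rw [pvColFold, pvUniqEq]

-- ===== VERDICT (by name: the statement is the Claim_ definition above) =====
theorem get_filter_dict_spec : Claim_equal_get_filter_dict := by
  intro source_list _
  show get_filter_dict source_list = get_filter_dict_alt source_list
  have hinit : (((((PySem.Dict.empty.insert "attribution" ([] : List String)).insert "os" []).insert "arch" []).insert "version" []).insert "group" []).insert "status" [] = pvMk6 [] [] [] [] [] [] := rfl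
  simp only [get_filter_dict, get_filter_dict_alt]
  rw [hinit, pvOuter]
  simp only [pvColUniq]
  rfl
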